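-- pv_equiv track=rewrite | github.com/karthikb19/aoc20256 | day3/main.py | get_largest_valid_number
-- ===== SOURCE A (Python) =====
-- from typing import List, Tuple
--
-- def get_largest_valid_number(A: List[int], K: int) -> Tuple[str, int]:
--     N = len(A)
--     val = max(A[:N-K+1])
--     idx = -1
--     for i in range(0, N):
--         if A[i] == val:
--             idx = i
--             break
--
--     return (str(val), idx)
-- ===== SOURCE B (Python) =====
-- def get_largest_valid_number(A, K):
--     # One fused pass: running maximum of the prefix A[:len(A)-K+1] and its first index.
--     best_val, best_idx = A[0], 0
--     for i, x in enumerate(A[1:len(A)-K+1], 1):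
--         if x > best_val:
--             best_val, best_idx = x, i
--     return (str(best_val), best_idx)
-- ===== Notes on version B (the rewrite author's own statement) =====
-- stated objective: alternative
-- what changed: A scans the prefix with max() and then rescans the list for the first index of that value; B makes one fused pass over the prefix, maintaining the running maximum and its first index. Pre_ excludes exactly the inputs on which a program raises: those where the prefix A[:N-K+1] is empty (A raises ValueError from max()) and the empty list (B raises IndexError).
import Mathlib
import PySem

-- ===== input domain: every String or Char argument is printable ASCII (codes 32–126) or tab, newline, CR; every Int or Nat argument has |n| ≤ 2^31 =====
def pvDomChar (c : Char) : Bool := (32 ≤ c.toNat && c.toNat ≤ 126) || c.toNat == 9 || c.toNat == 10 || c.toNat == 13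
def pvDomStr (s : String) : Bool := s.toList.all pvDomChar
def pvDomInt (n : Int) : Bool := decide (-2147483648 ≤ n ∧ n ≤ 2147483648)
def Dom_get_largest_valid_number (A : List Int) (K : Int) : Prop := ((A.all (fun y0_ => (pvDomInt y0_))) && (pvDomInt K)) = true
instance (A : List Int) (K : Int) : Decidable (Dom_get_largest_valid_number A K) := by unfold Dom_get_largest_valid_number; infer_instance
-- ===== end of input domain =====

-- B fuses A's two scans (max of the prefix, then a separate first-index scan) into one pass
-- maintaining the running maximum and its first index; objective: alternative (single fused pass).

-- ===== PORT A =====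
-- A's 'for i in range(0, N): if A[i] == val: idx = i; break' (idx initialised to -1)
def aFindIdx (l : List Int) (val : Int) (i : Int) : Int :=
  match l with
  | [] => -1
  | x :: rest => if x = val then i else aFindIdx rest val (i + 1)

def get_largest_valid_number (A : List Int) (K : Int) : String × Int :=
  let N : Int := (A.length : Int)
  match PySem.List.max? (PySem.List.slice A none (some (N - K + 1))) (fun y => y) with
  | none => ("", -1)      -- Python raises ValueError here (empty prefix); excluded by Pre_
  | some val => (PySem.Int.toStr val, aFindIdx A val 0)

-- ===== PORT B =====
def get_largest_valid_number_alt (A : List Int) (K : Int) : String × Int :=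
  match PySem.List.pyGet? A 0 with
  | none => ("", -1)      -- Source B raises IndexError here (A empty); excluded by Pre_
  | some h =>
    let pref := PySem.List.slice A (some 1) (some ((A.length : Int) - K + 1))
    let p := (PySem.List.enumerate pref 1).foldl
      (fun (q : Int × Int) ix => if ix.2 > q.1 then (ix.2, ix.1) else q) (h, 0)
    (PySem.Int.toStr p.1, p.2)

-- ===== PRECONDITION & SPEC =====
-- Pre_ excludes exactly the inputs on which some program raises: the prefix A[:N-K+1] is empty,
-- where A raises ValueError (K = N+1 or K ≥ 2N+1 or A = []), and A = [] where B raises IndexError.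
def Pre_get_largest_valid_number (A : List Int) (K : Int) : Prop :=
  A ≠ [] ∧ (K ≤ (A.length : Int) ∨ ((A.length : Int) + 2 ≤ K ∧ K ≤ 2 * (A.length : Int)))
instance (A : List Int) (K : Int) : Decidable (Pre_get_largest_valid_number A K) := by
  unfold Pre_get_largest_valid_number; infer_instance

def pvWitness_get_largest_valid_number : List Int × Int := ([3, 1], 1)

def Spec_get_largest_valid_number (A : List Int) (K : Int) (out : String × Int) : Prop := out = get_largest_valid_number_alt A K
instance (A : List Int) (K : Int) (out : String × Int) : Decidable (Spec_get_largest_valid_number A K out) := by unfold Spec_get_largest_valid_number; infer_instance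

-- ===== CLAIM (what is proved, stated in full; the proofs are below) =====
def Claim_equal_get_largest_valid_number : Prop := ∀ (A : List Int) (K : Int), Dom_get_largest_valid_number A K → Pre_get_largest_valid_number A K → Spec_get_largest_valid_number A K (get_largest_valid_number A K)

-- ===== LEMMAS AND PROOFS =====

-- proof-only model of B's fused loop, structural over the remaining prefix
def fusedGo : List Int → Int → Int × Int → Int × Int
  | [], _, p => p
  | x :: rest, i, p => fusedGo rest (i + 1) (if x > p.1 then (x, i) else p)

lemma foldE (tl : List Int) : ∀ (s : Int) (p : Int × Int),
    (PySem.List.enumerate tl s).foldl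
      (fun (q : Int × Int) ix => if ix.2 > q.1 then (ix.2, ix.1) else q) p
    = fusedGo tl s p := by
  induction tl with
  | nil => intro s p; simp [PySem.List.enumerate_nil, fusedGo]
  | cons x rest ih =>
    intro s p
    rw [PySem.List.enumerate_cons]
    simp only [List.foldl_cons, fusedGo]
    exact ih (s + 1) _

lemma slice_some_some (xs : List Int) (a b : Int) :
    PySem.List.slice xs (some a) (some b)
    = List.take (PySem.List.clampIdx xs.length b - PySem.List.clampIdx xs.length a)
        (List.drop (PySem.List.clampIdx xs.length a) xs) := rfl

lemma fused_spec (l : List Int) : ∀ (i0 bv bi : Int),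
    (fusedGo l i0 (bv, bi) = (bv, bi) ∧ ∀ x ∈ l, x ≤ bv) ∨
    (∃ n : Nat, ∃ hn : n < l.length,
       fusedGo l i0 (bv, bi) = (l[n], i0 + n) ∧ bv < l[n] ∧
       (∀ k (hk : k < n), l[k] < l[n]) ∧ (∀ x ∈ l, x ≤ l[n])) := by
  induction l with
  | nil => intro i0 bv bi; left; exact ⟨rfl, by simp⟩
  | cons x rest ih =>
    intro i0 bv bi
    by_cases hx : x > bv
    · have hstep : fusedGo (x :: rest) i0 (bv, bi) = fusedGo rest (i0 + 1) (x, i0) := by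
        simp [fusedGo, hx]
      rcases ih (i0 + 1) x i0 with ⟨heq, hall⟩ | ⟨n, hn, heq, hbv', hlt, hle⟩
      · right
        refine ⟨0, by simp, ?_, by simpa using hx, ?_, ?_⟩
        · rw [hstep, heq]; simp
        · intro k hk; omega
        · intro y hy
          rcases List.mem_cons.mp hy with h | h
          · simp [h]
          · exact hall y h
      · right
        refine ⟨n + 1, by simpa using hn, ?_, ?_, ?_, ?_⟩
        · rw [hstep, heq]
          simp only [List.getElem_cons_succ, Prod.mk.injEq]
          exact ⟨trivial, by push_cast; ring⟩
        · simp; omega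
        · intro k hk
          cases k with
          | zero => simp; omega
          | succ j => simpa using hlt j (by omega)
        · intro y hy
          rcases List.mem_cons.mp hy with h | h
          · simp [h]; omega
          · simpa using hle y h
    · have hstep : fusedGo (x :: rest) i0 (bv, bi) = fusedGo rest (i0 + 1) (bv, bi) := by
        simp [fusedGo, hx]
      rcases ih (i0 + 1) bv bi with ⟨heq, hall⟩ | ⟨n, hn, heq, hbv', hlt, hle⟩
      · left
        refine ⟨by rw [hstep, heq], ?_⟩
        intro y hy
        rcases List.mem_cons.mp hy with h | h
        · omega
        · exact hall y h
      · right
        refine ⟨n + 1, by simpa using hn, ?_, ?_, ?_, ?_⟩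
        · rw [hstep, heq]
          simp only [List.getElem_cons_succ, Prod.mk.injEq]
          exact ⟨trivial, by push_cast; ring⟩
        · simpa using hbv'
        · intro k hk
          cases k with
          | zero => simp; omega
          | succ j => simpa using hlt j (by omega)
        · intro y hy
          rcases List.mem_cons.mp hy with h | h
          · simp [h]; omega
          · simpa using hle y h

lemma foldl_max_le (l : List Int) : ∀ (bv c : Int), bv ≤ c → (∀ x ∈ l, x ≤ c) → l.foldl max bv ≤ c := by
  induction l with
  | nil => intro bv c h _; simpa using h
  | cons x rest ih =>
    intro bv c h hall
    simp only [List.foldl_cons]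
    exact ih _ c (by have := hall x (by simp); omega) (fun y hy => hall y (by simp [hy]))

lemma aFind_eq (l : List Int) (val : Int) : ∀ (n : Nat) (i0 : Int) (hn : n < l.length),
    l[n] = val → (∀ k (hk : k < n), l[k] ≠ val) → aFindIdx l val i0 = i0 + n := by
  induction l with
  | nil => intro n i0 hn; simp at hn
  | cons x rest ih =>
    intro n i0 hn hval hne
    cases n with
    | zero => simp at hval; simp [aFindIdx, hval]
    | succ m =>
      have hx : x ≠ val := by have := hne 0 (by omega); simpa using this
      have : aFindIdx rest val (i0 + 1) = (i0 + 1) + m := by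
        refine ih m (i0 + 1) (by simpa using hn) (by simpa using hval) ?_
        intro k hk
        have := hne (k + 1) (by omega)
        simpa using this
      simp only [aFindIdx, if_neg hx, this]
      push_cast; ring

-- the whole computation, for a prefix of e elements (1 ≤ e), head h already split off
lemma core (h : Int) (A' : List Int) (e : Nat) (h1 : 1 ≤ e) :
    (match PySem.List.max? ((h :: A').take e) (fun y => y) with
     | none => (("" : String), (-1 : Int))
     | some val => (PySem.Int.toStr val, aFindIdx (h :: A') val 0))
    =
    (let p := fusedGo (A'.take (e - 1)) 1 (h, 0)
     (PySem.Int.toStr p.1, p.2)) := by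
  have het : e = (e - 1) + 1 := by omega
  have htake : (h :: A').take e = h :: A'.take (e - 1) := by
    rw [het]; simp
  set tl := A'.take (e - 1) with htl
  rw [htake, PySem.List.max?_id_cons]
  have htll : tl.length ≤ A'.length := by rw [htl, List.length_take]; omega
  have hatl : ∀ (j : Nat) (hj : j < tl.length), tl[j] = A'[j]'(lt_of_lt_of_le hj htll) := by
    intro j hj
    simp [htl, List.getElem_take]
  rcases fused_spec tl 1 h 0 with ⟨heq, hall⟩ | ⟨n, hn, heq, hbv, hlt, hle⟩
  · -- running max never updated: max is the head, first index 0
    have hmax : tl.foldl max h = h :=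
      le_antisymm (foldl_max_le tl h h le_rfl hall) (PySem.List.le_foldl_max tl h).1
    rw [heq, hmax]
    simp [aFindIdx]
  · -- max attained first at tl[n], i.e. at index n+1 of A
    have hmem : tl[n] ∈ tl := List.getElem_mem hn
    have hmax : tl.foldl max h = tl[n] :=
      le_antisymm (foldl_max_le tl h tl[n] (le_of_lt hbv) hle)
        ((PySem.List.le_foldl_max tl h).2 _ hmem)
    have hlen : n + 1 < (h :: A').length := by
      simp
      omega
    have hfind : aFindIdx (h :: A') tl[n] 0 = 0 + (n + 1) := by
      refine aFind_eq (h :: A') tl[n] (n + 1) 0 hlen ?_ ?_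
      · simp only [List.getElem_cons_succ]
        exact (hatl n hn).symm
      · intro k hk
        cases k with
        | zero => simp; omega
        | succ j =>
          have hj : j < n := by omega
          have hjtl : j < tl.length := hj.trans hn
          simp only [List.getElem_cons_succ]
          rw [← hatl j hjtl]
          exact ne_of_lt (hlt j hj)
    rw [heq, hmax]
    simp [hfind]
    omega

-- ===== VERDICT (by name: the statement is the Claim_ definition above) =====
theorem get_largest_valid_number_spec : Claim_equal_get_largest_valid_number := by
  intro A K _ hPre
  obtain ⟨hne, hK⟩ := hPre
  unfold Spec_get_largest_valid_number
  obtain ⟨h, A', rfl⟩ : ∃ h A', A = h :: A' := by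
    cases A with
    | nil => exact absurd rfl hne
    | cons h A' => exact ⟨h, A', rfl⟩
  set A : List Int := h :: A' with hA
  have hN : 1 ≤ (A.length : Int) := by simp [hA]
  set stop : Int := (A.length : Int) - K + 1 with hstop
  set c2 : Nat := PySem.List.clampIdx A.length stop with hc2
  have hc1 : PySem.List.clampIdx A.length 1 = 1 := by
    have : (1 : Int) = ((1 : Nat) : Int) := rfl
    rw [this, PySem.List.clampIdx_natCast]
    simp [hA]
  have hc2N : c2 ≤ A.length := by rw [hc2]; exact PySem.List.clampIdx_le _ _
  have hc2v : 1 ≤ c2 := by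
    rcases hK with hle | ⟨hge, hle2⟩
    · -- stop ≥ 1
      have hs1 : 1 ≤ stop := by omega
      have : stop = ((stop.toNat : Nat) : Int) := by omega
      rw [hc2, this, PySem.List.clampIdx_natCast]
      have hln : 1 ≤ A.length := by simp [hA]
      omega
    · -- −(N−1) ≤ stop ≤ −1
      have hk : 0 < (-stop).toNat := by omega
      have : stop = -(((-stop).toNat : Nat) : Int) := by omega
      rw [hc2, this, PySem.List.clampIdx_neg_natCast _ _ hk]
      omega
  -- A's slice is A.take c2
  have hsliceA : PySem.List.slice A none (some stop) = A.take c2 := by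
    rcases le_or_gt 0 stop with hge0 | hlt0
    · rw [PySem.List.slice_to A hge0]
      have : stop = ((stop.toNat : Nat) : Int) := by omega
      rw [hc2, this, PySem.List.clampIdx_natCast]
      simp only [Int.toNat_natCast]
      rcases le_or_gt stop.toNat A.length with hle | hgt
      · rw [min_eq_left hle]
      · rw [min_eq_right (le_of_lt hgt), List.take_length,
          List.take_of_length_le (le_of_lt hgt)]
    · have hk : 0 < (-stop).toNat := by omega
      have hrepr : stop = -(((-stop).toNat : Nat) : Int) := by omega
      rw [hrepr, PySem.List.slice_to_neg_natCast A _ hk, hc2, hrepr,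
        PySem.List.clampIdx_neg_natCast _ _ hk]
      simp
      omega
  -- B's slice is A'.take (c2 - 1)
  have hsliceB : PySem.List.slice A (some 1) (some stop) = A'.take (c2 - 1) := by
    rw [slice_some_some, hc1, ← hc2]
    simp [hA]
  have hget0 : PySem.List.pyGet? A 0 = some h := by
    simp [hA, PySem.List.pyGet?, PySem.List.pyIdx?]
  show get_largest_valid_number A K = get_largest_valid_number_alt A K
  unfold get_largest_valid_number get_largest_valid_number_alt
  rw [hget0]
  simp only [← hstop, hsliceA, hsliceB, foldE]
  exact core h A' c2 hc2v
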